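-- pv_equiv track=rewrite | github.com/johansson017/Advent_of_Code_2023 | day12/main.py | spring_permutations
-- ===== SOURCE A (Python) =====
-- import re, functools, itertools
--
-- def spring_permutations(spring: str, order: list[int]):
--     permutations: list[str] = []
--     total_broken = sum(order)
--     place_amount = total_broken - spring.count("#")
--
--     unid_index: list[int] = []
--     for idx, char in enumerate(spring):
--         if char == "?":
--             unid_index.append(idx)
--
--     unid_permutations = list(itertools.combinations(unid_index, place_amount))
--
--     for perm in unid_permutations:
--         temp_list = list(spring)
--         for val in perm:
--             temp_list[val] = "#"
--         temp_list = "".join(temp_list)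
--         permutations.append(temp_list)
--
--     return permutations
-- ===== SOURCE B (Python) =====
-- def spring_permutations(spring: str, order: list[int]):
--     place_amount = sum(order) - spring.count("#")
--     if place_amount < 0:
--         return []
--     unid_index = [i for i, c in enumerate(spring) if c == "?"]
--
--     def rec(chars, rest, k):
--         # include/exclude recursion over the remaining '?' indices
--         if k == 0:
--             return ["".join(chars)]
--         if not rest:
--             return []
--         i, rs = rest[0], rest[1:]
--         return rec(chars[:i] + ["#"] + chars[i + 1:], rs, k - 1) + rec(chars, rs, k)
--
--     return rec(list(spring), unid_index, place_amount)
-- ===== Notes on version B (the rewrite author's own statement) =====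
-- stated objective: alternative
-- what changed: B replaces itertools.combinations over the '?' indices followed by a full per-combination copy-and-substitute pass with a single include/exclude recursion that commits each '?' to '#' or skips it, sharing the already-built prefix work across outputs and emitting results in the same lexicographic order.
import Mathlib
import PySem

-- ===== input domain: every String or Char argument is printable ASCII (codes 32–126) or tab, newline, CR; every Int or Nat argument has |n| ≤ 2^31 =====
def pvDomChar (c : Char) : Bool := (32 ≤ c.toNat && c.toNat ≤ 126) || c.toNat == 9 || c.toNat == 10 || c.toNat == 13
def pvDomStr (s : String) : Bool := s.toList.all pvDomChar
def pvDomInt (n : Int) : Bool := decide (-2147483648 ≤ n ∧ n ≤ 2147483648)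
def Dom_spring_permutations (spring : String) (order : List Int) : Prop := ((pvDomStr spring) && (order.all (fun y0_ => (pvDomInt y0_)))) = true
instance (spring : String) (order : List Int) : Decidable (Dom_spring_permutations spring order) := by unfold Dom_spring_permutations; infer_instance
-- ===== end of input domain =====

-- B replaces the itertools.combinations enumeration + substitution pass by a single
-- include/exclude recursion over the '?' positions that builds each string directly (objective: alternative).

-- ===== PORT A =====
-- temp_list[val] = "#" : indices produced by enumerate are nonnegative and in range
def pvSetHash (cs : List Char) (v : Int) : List Char := cs.set v.toNat '#'

-- itertools.combinations(xs, r), lexicographic order of index choices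
def pvCombinations (xs : List Int) (r : Nat) : List (List Int) :=
  match r, xs with
  | 0, _ => [[]]
  | _ + 1, [] => []
  | n + 1, x :: rest => (pvCombinations rest n).map (fun c => x :: c) ++ pvCombinations rest (n + 1)

def spring_permutations (spring : String) (order : List Int) : List String :=
  let total_broken : Int := order.sum
  let place_amount : Int := total_broken - (PySem.Str.count spring "#" : Int)
  let unid_index : List Int :=
    (PySem.List.enumerate spring.toList).foldl
      (fun acc p => if p.2 = '?' then acc ++ [p.1] else acc) []
  -- combinations raises ValueError for negative r; excluded by Pre_, toNat is only read on place_amount ≥ 0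
  let unid_permutations := pvCombinations unid_index place_amount.toNat
  unid_permutations.foldl
    (fun permutations perm =>
      permutations ++ [String.ofList (perm.foldl (fun temp_list val => pvSetHash temp_list val) spring.toList)]) []

-- ===== PORT B =====
def pvRecB (chars : List Char) (rest : List Int) (k : Nat) : List String :=
  match k, rest with
  | 0, _ => [String.ofList chars]
  | _ + 1, [] => []
  | n + 1, i :: rs =>
      pvRecB (chars.take i.toNat ++ ['#'] ++ chars.drop (i.toNat + 1)) rs n ++ pvRecB chars rs (n + 1)

def spring_permutations_alt (spring : String) (order : List Int) : List String :=
  let place_amount : Int := order.sum - (PySem.Str.count spring "#" : Int)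
  if place_amount < 0 then []
  else
    let unid_index : List Int :=
      (PySem.List.enumerate spring.toList).filterMap (fun p => if p.2 = '?' then some p.1 else none)
    pvRecB spring.toList unid_index place_amount.toNat

-- ===== PRECONDITION & SPEC =====
-- A raises ValueError (itertools.combinations with negative r) when sum(order) < spring.count('#'); exactly those inputs are excluded.
def Pre_spring_permutations (spring : String) (order : List Int) : Prop :=
  0 ≤ order.sum - (PySem.Str.count spring "#" : Int)
instance (spring : String) (order : List Int) : Decidable (Pre_spring_permutations spring order) := by unfold Pre_spring_permutations; infer_instance
def pvWitness_spring_permutations : String × List Int := ("??.#?", [2, 1])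

def Spec_spring_permutations (spring : String) (order : List Int) (out : List String) : Prop := out = spring_permutations_alt spring order
instance (spring : String) (order : List Int) (out : List String) : Decidable (Spec_spring_permutations spring order out) := by unfold Spec_spring_permutations; infer_instance

-- ===== CLAIM (what is proved, stated in full; the proofs are below) =====
def Claim_equal_spring_permutations : Prop := ∀ (spring : String) (order : List Int), Dom_spring_permutations spring order → Pre_spring_permutations spring order → Spec_spring_permutations spring order (spring_permutations spring order)

-- ===== LEMMAS AND PROOFS =====

theorem pvRecB_eq_map_comb (rest : List Int) (k : Nat) (chars : List Char)
    (h : ∀ i ∈ rest, i.toNat < chars.length) :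
    pvRecB chars rest k =
      (pvCombinations rest k).map
        (fun perm => String.ofList (perm.foldl (fun cs v => pvSetHash cs v) chars)) := by
  induction rest generalizing k chars with
  | nil => cases k <;> simp [pvRecB, pvCombinations]
  | cons i rs ih =>
    cases k with
    | zero => simp [pvRecB, pvCombinations]
    | succ n =>
      have hi : i.toNat < chars.length := h i (by simp)
      have hrs : ∀ j ∈ rs, j.toNat < chars.length := fun j hj => h j (by simp [hj])
      have hset : chars.take i.toNat ++ ['#'] ++ chars.drop (i.toNat + 1) = pvSetHash chars i := by
        rw [pvSetHash, List.set_eq_take_cons_drop _ hi]; simp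
      have hrs' : ∀ j ∈ rs, j.toNat < (pvSetHash chars i).length := by
        simpa [pvSetHash] using hrs
      simp only [pvRecB, pvCombinations, hset, ih n (pvSetHash chars i) hrs', ih (n + 1) chars hrs,
        List.map_append, List.map_map]
      simp [Function.comp]

theorem filterMap_eq_foldl (l : List (Int × Char)) (acc : List Int) :
    l.foldl (fun acc p => if p.2 = '?' then acc ++ [p.1] else acc) acc
      = acc ++ l.filterMap (fun p => if p.2 = '?' then some p.1 else none) := by
  induction l generalizing acc with
  | nil => simp
  | cons p l ih =>
    by_cases hp : p.2 = '?' <;> simp [hp, ih]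

theorem mem_uidx_lt (xs : List Char) (i : Int)
    (hi : i ∈ (PySem.List.enumerate xs).filterMap (fun p => if p.2 = '?' then some p.1 else none)) :
    i.toNat < xs.length := by
  rw [List.mem_filterMap] at hi
  obtain ⟨p, hp, hq⟩ := hi
  rw [PySem.List.mem_enumerate_iff] at hp
  obtain ⟨k, hk, rfl⟩ := hp
  split at hq
  · simp at hq; omega
  · exact absurd hq (by simp)

-- ===== VERDICT (by name: the statement is the Claim_ definition above) =====
theorem spring_permutations_spec : Claim_equal_spring_permutations := by
  intro spring order _ hpre
  unfold Spec_spring_permutations spring_permutations spring_permutations_alt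
  have hlt : ¬ (order.sum - (PySem.Str.count spring "#" : Int) < 0) := by
    unfold Pre_spring_permutations at hpre; omega
  simp only [hlt, if_false]
  rw [filterMap_eq_foldl, List.nil_append,
      PySem.List.foldl_append_singleton_eq_map, List.nil_append,
      pvRecB_eq_map_comb _ _ _ (fun i hi => mem_uidx_lt _ i hi)]
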